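-- pv_equiv track=rewrite | github.com/B4rb4r1s/TSM | generate_summaries.py | determine_completed_models
-- ===== SOURCE A (Python) =====
-- MODEL_COL_MAP = {
--     "textrank": "summary_TextRank",
--     "lexrank":  "summary_LexRank",
--     "mt5":      "summary_mt5",
--     "mbart":    "summary_mbart",
--     "rut5":     "summary_rut5",
--     "t5":       "summary_t5",
-- }
--
-- def determine_completed_models(existing_results):
--     """Определить, какие модели уже полностью обработаны."""
--     if not existing_results:
--         return set()
--     completed = set()
--     for model_key, col_name in MODEL_COL_MAP.items():
--         all_filled = all(
--             row.get(col_name, "") != ""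
--             for row in existing_results.values()
--         )
--         if all_filled:
--             completed.add(model_key)
--     return completed
-- ===== SOURCE B (Python) =====
-- MODEL_COL_MAP = {
--     "textrank": "summary_TextRank",
--     "lexrank":  "summary_LexRank",
--     "mt5":      "summary_mt5",
--     "mbart":    "summary_mbart",
--     "rut5":     "summary_rut5",
--     "t5":       "summary_t5",
-- }
--
-- def determine_completed_models(existing_results):
--     """Определить, какие модели уже полностью обработаны."""
--     if not existing_results:
--         return set()
--     n = len(existing_results)
--     # one pass: tally, per column, in how many rows that cell is non-empty
--     counts = {}
--     for row in existing_results.values():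
--         for col, val in row.items():
--             if val != "":
--                 counts[col] = counts.get(col, 0) + 1
--     # a model is completed iff its column's tally equals the number of rows
--     return {k for k, col in MODEL_COL_MAP.items() if counts.get(col, 0) == n}
-- ===== Notes on version B (the rewrite author's own statement) =====
-- stated objective: alternative
-- what changed: Replaced A's six independent all()-scans over the rows by a single pass that builds a counter dict tallying, per column, how many rows have that cell non-empty, then declares a model completed iff its column's tally equals the row count.
import Mathlib
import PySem

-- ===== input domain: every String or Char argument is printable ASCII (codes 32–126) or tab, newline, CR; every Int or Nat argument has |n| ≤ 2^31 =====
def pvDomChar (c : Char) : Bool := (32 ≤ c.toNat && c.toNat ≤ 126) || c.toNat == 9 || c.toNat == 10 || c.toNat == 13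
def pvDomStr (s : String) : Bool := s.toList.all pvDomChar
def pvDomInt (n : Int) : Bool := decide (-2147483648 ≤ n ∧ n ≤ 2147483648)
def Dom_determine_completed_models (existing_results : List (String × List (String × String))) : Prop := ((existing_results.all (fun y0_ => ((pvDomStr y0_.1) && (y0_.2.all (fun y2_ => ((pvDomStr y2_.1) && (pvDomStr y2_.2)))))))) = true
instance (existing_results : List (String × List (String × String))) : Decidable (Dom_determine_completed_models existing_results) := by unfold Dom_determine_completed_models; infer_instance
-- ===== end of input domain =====

-- B replaces A's per-model all()-scans by a different algorithm: one pass tallies, in a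
-- counter dict, how many rows fill each column; a model is completed iff its column's
-- tally equals the row count (same cost; alternative algorithm/data structure).

-- MODEL_COL_MAP, shared module constant
def pvModelColMap : List (String × String) :=
  [("textrank", "summary_TextRank"), ("lexrank", "summary_LexRank"),
   ("mt5", "summary_mt5"), ("mbart", "summary_mbart"),
   ("rut5", "summary_rut5"), ("t5", "summary_t5")]

-- row.get(col_name, "") != ""
def pvFilled (row : List (String × String)) (col : String) : Bool :=
  PySem.Dict.getD (PySem.Dict.ofList row) col "" != ""

-- ===== PORT A =====
def determine_completed_models (existing_results : List (String × List (String × String))) : List String :=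
  if existing_results.isEmpty then PySem.Set.empty
  else
    pvModelColMap.foldl
      (fun completed p =>
        if (PySem.Dict.ofList existing_results).values.all (fun row => pvFilled row p.2)
        then PySem.Set.add completed p.1
        else completed)
      PySem.Set.empty

-- ===== PORT B =====
def determine_completed_models_alt (existing_results : List (String × List (String × String))) : List String :=
  if existing_results.isEmpty then PySem.Set.empty
  else
    let n : Int := (PySem.Dict.ofList existing_results).size
    let counts : PySem.Dict String Int :=
      (PySem.Dict.ofList existing_results).values.foldl
        (fun counts row =>
          (PySem.Dict.ofList row).items.foldl
            (fun d p => if p.2 != "" then d.modify p.1 0 (· + 1) else d)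
            counts)
        PySem.Dict.empty
    pvModelColMap.foldl
      (fun s p => if counts.getD p.2 0 == n then PySem.Set.add s p.1 else s)
      PySem.Set.empty

-- ===== PRECONDITION & SPEC =====
def Spec_determine_completed_models (existing_results : List (String × List (String × String))) (out : List String) : Prop := out = determine_completed_models_alt existing_results
instance (existing_results : List (String × List (String × String))) (out : List String) : Decidable (Spec_determine_completed_models existing_results out) := by unfold Spec_determine_completed_models; infer_instance

-- ===== CLAIM =====
def Claim_equal_determine_completed_models : Prop := ∀ (existing_results : List (String × List (String × String))), Dom_determine_completed_models existing_results → Spec_determine_completed_models existing_results (determine_completed_models existing_results)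

-- ===== LEMMAS AND PROOFS =====

-- B's guarded inner loop over a row's items is a plain counting loop over the
-- keys of the row's non-empty cells
theorem pv_inner_as_modify (l : List (String × String)) :
    ∀ (d : PySem.Dict String Int),
      l.foldl (fun d p => if p.2 != "" then d.modify p.1 0 (· + 1) else d) d
      = ((l.filter (fun p => p.2 != "")).map Prod.fst).foldl
          (fun d x => d.modify x 0 (· + 1)) d := by
  induction l with
  | nil => intro d; simp
  | cons p rest ih =>
    intro d
    by_cases h : p.2 != ""
    · simp only [List.foldl_cons, List.filter_cons, h, if_pos, List.map_cons]
      exact ih _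
    · simp only [List.foldl_cons, List.filter_cons, h, if_neg, Bool.false_eq_true,
        not_false_iff]
      exact ih d

-- a key absent from an association list is not counted
theorem pv_count_zero_of_not_mem (l : List (String × String)) (c : String)
    (h : c ∉ l.map Prod.fst) (g : String × String → Bool) :
    ((l.filter g).map Prod.fst).count c = 0 := by
  rw [List.count_eq_zero]
  intro hmem
  exact h (by
    rcases List.mem_map.mp hmem with ⟨p, hp, hpc⟩
    exact List.mem_map.mpr ⟨p, List.mem_of_mem_filter hp, hpc⟩)

-- over distinct keys, the non-empty-cell key list counts c exactly once iff the
-- row's cell at c is filled (first-match lookup)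
theorem pv_count_filled (l : List (String × String)) (c : String) :
    (l.map Prod.fst).Nodup →
    (((l.filter (fun p => p.2 != "")).map Prod.fst).count c : Int)
      = if (PySem.Dict.mk l).getD c "" != "" then 1 else 0 := by
  induction l with
  | nil =>
    intro _
    simp [PySem.Dict.getD, PySem.Dict.get?]
  | cons p rest ih =>
    obtain ⟨k, v⟩ := p
    intro hnd
    simp only [List.map_cons, List.nodup_cons] at hnd
    have hget : (PySem.Dict.mk ((k, v) :: rest)).getD c ""
        = if k == c then v else (PySem.Dict.mk rest).getD c "" := by
      rw [PySem.Dict.getD_eq_get?_getD, PySem.Dict.get?_mk_cons]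
      by_cases hc : k == c
      · simp [hc]
      · simp [hc, PySem.Dict.getD_eq_get?_getD]
    rw [hget]
    by_cases hc : k = c
    · subst hc
      have hz : ((rest.filter (fun p => p.2 != "")).map Prod.fst).count k = 0 :=
        pv_count_zero_of_not_mem rest k hnd.1 _
      by_cases hv : v = ""
      · simp [hv, hz]
      · simp [hv, hz]
    · simp only [show (k == c) = false from by simp [hc], Bool.false_eq_true, if_false]
      by_cases hv : v = ""
      · rw [List.filter_cons]
        simp only [hv, bne_self_eq_false, Bool.false_eq_true, if_false]
        exact ih hnd.2
      · rw [List.filter_cons, if_pos (by simp [hv]), List.map_cons, List.count_cons,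
          if_neg (by simp [hc]), Nat.add_zero]
        exact ih hnd.2

-- after the row pass, the counter holds, for each column, the number of rows
-- whose cell at that column is filled
theorem pv_counts_spec (rows : List (List (String × String))) :
    ∀ (d : PySem.Dict String Int) (c : String),
      PySem.Dict.getD
        (rows.foldl
          (fun counts row =>
            (PySem.Dict.ofList row).items.foldl
              (fun d p => if p.2 != "" then d.modify p.1 0 (· + 1) else d)
              counts)
          d) c 0
      = d.getD c 0 + (rows.countP (fun row => pvFilled row c) : Int) := by
  induction rows with
  | nil => intro d c; simp
  | cons row rest ih =>
    intro d c
    simp only [List.foldl_cons, List.countP_cons]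
    rw [ih]
    rw [pv_inner_as_modify, PySem.Dict.getD_foldl_modify_add_one]
    have hnd : ((PySem.Dict.ofList row).items.map Prod.fst).Nodup :=
      PySem.Dict.nodup_keys_ofList row
    have hmk : PySem.Dict.mk (PySem.Dict.ofList row).items = PySem.Dict.ofList row := rfl
    rw [pv_count_filled _ c hnd, hmk]
    have hpf : (PySem.Dict.getD (PySem.Dict.ofList row) c "" != "") = pvFilled row c := rfl
    rw [hpf]
    by_cases h : pvFilled row c
    · simp only [h, if_pos]
      push_cast
      ring
    · simp [h]

-- B's tally test coincides with A's all()-test, column by column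
theorem pv_cond_eq (er : List (String × List (String × String))) (col : String) :
    (PySem.Dict.getD
        ((PySem.Dict.ofList er).values.foldl
          (fun counts row =>
            (PySem.Dict.ofList row).items.foldl
              (fun d p => if p.2 != "" then d.modify p.1 0 (· + 1) else d)
              counts)
          PySem.Dict.empty) col 0
      == ((PySem.Dict.ofList er).size : Int))
    = (PySem.Dict.ofList er).values.all (fun row => pvFilled row col) := by
  rw [pv_counts_spec]
  simp only [PySem.Dict.getD_empty, zero_add]
  set rows := (PySem.Dict.ofList er).values with hrows
  have hlen : rows.length = (PySem.Dict.ofList er).size := by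
    simp [hrows, PySem.Dict.values, PySem.Dict.size]
  rw [← hlen]
  by_cases h : rows.all (fun row => pvFilled row col)
  · have := List.all_eq_true.mp h
    have hcp : rows.countP (fun row => pvFilled row col) = rows.length :=
      List.countP_eq_length.mpr (by intro a ha; exact this a ha)
    simp [h, hcp]
  · have hne : rows.countP (fun row => pvFilled row col) ≠ rows.length := by
      intro heq
      exact h (List.all_eq_true.mpr (List.countP_eq_length.mp heq))
    simp only [h]
    rw [beq_eq_false_iff_ne]
    intro heq
    exact hne (by exact_mod_cast heq)

-- folds of conditional adds with pointwise-equal conditions agree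
theorem pv_fold_congr (l : List (String × String))
    (f g : String × String → Bool) (h : ∀ p ∈ l, f p = g p) :
    ∀ (s : List String),
      l.foldl (fun s p => if f p then PySem.Set.add s p.1 else s) s
      = l.foldl (fun s p => if g p then PySem.Set.add s p.1 else s) s := by
  induction l with
  | nil => intro s; rfl
  | cons p rest ih =>
    intro s
    simp only [List.foldl_cons, h p List.mem_cons_self]
    exact ih (fun q hq => h q (List.mem_cons_of_mem _ hq)) _

-- ===== VERDICT =====
theorem determine_completed_models_spec : Claim_equal_determine_completed_models := by
  intro er _
  unfold Spec_determine_completed_models determine_completed_models determine_completed_models_alt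
  by_cases he : er.isEmpty
  · simp [he]
  · rw [if_neg he, if_neg he]
    exact pv_fold_congr pvModelColMap _ _
      (fun p _ => (pv_cond_eq er p.2).symm) PySem.Set.empty
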